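-- pv_equiv track=rewrite | github.com/kangdaeki/baekjoon | 1436/666.py | has666
-- ===== SOURCE A (Python) =====
-- def has666(n):
--     count=0
--     while n>0:
--         if 6==n%10: count+=1
--         else: count=0
--         if 3==count: return True
--         n=n//10
--     return False
-- ===== SOURCE B (Python) =====
-- def has666(n):
--     return n > 0 and "666" in str(n)
-- ===== Notes on version B (the rewrite author's own statement) =====
-- stated objective: simpler
-- what changed: Replaces the digit-extraction loop with a consecutive-6 counter by a single substring search for "666" in the decimal string of n (guarded by n > 0).
import Mathlib
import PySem

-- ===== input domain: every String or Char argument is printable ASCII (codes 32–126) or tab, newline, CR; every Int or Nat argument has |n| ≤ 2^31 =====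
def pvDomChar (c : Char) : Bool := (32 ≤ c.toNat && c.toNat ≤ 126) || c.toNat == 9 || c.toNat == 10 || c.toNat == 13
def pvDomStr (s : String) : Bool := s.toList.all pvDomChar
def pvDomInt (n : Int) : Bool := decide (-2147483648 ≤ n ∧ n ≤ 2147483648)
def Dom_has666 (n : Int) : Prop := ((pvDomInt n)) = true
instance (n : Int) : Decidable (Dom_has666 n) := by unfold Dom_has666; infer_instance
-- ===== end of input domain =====

-- B replaces A's digit loop with a counter by a substring search for "666" in str(n); objective: simpler.

-- ===== PORT A =====
-- the while-loop of A: state (n, count)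
def has666Loop (n count : Int) : Bool :=
  if h : 0 < n then
    let count' := if 6 == PySem.Int.mod n 10 then count + 1 else 0
    if 3 == count' then true
    else has666Loop (PySem.Int.floordiv n 10) count'
  else false
termination_by n.toNat
decreasing_by
  have h10 : PySem.Int.floordiv n 10 = n / 10 - 0 := by
    unfold PySem.Int.floordiv
    rw [Int.fdiv_eq_ediv, if_pos (Or.inl (by norm_num))]
  omega

def has666 (n : Int) : Bool := has666Loop n 0

-- ===== PORT B =====
def has666_alt (n : Int) : Bool :=
  decide (n > 0) && PySem.Str.isIn "666" (PySem.Int.toStr n)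

-- ===== PRECONDITION & SPEC =====
def Spec_has666 (n : Int) (out : Bool) : Prop := out = has666_alt n
instance (n : Int) (out : Bool) : Decidable (Spec_has666 n out) := by unfold Spec_has666; infer_instance

-- ===== CLAIM (what is proved, stated in full; the proofs are below) =====
def Claim_equal_has666 : Prop := ∀ (n : Int), Dom_has666 n → Spec_has666 n (has666 n)

-- ===== LEMMAS AND PROOFS =====

-- Nat-level mirror of A's loop, over the little-endian digit list
def scan6 : List Nat → Nat → Bool
  | [], _ => false
  | d :: ds, c =>
    let c' := if d = 6 then c + 1 else 0
    if c' = 3 then true else scan6 ds c'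

theorem has666Loop_eq_scan6 (m : Nat) : ∀ c : Nat,
    has666Loop (m : Int) (c : Int) = scan6 (Nat.digits 10 m) c := by
  induction m using Nat.strong_induction_on with
  | _ m ih =>
    intro c
    by_cases hm : 0 < m
    · have hmod : PySem.Int.mod (m : Int) 10 = ((m % 10 : Nat) : Int) := by
        unfold PySem.Int.mod
        rw [Int.fmod_eq_emod, if_pos (Or.inl (by norm_num))]
        omega
      have hdiv : PySem.Int.floordiv (m : Int) 10 = ((m / 10 : Nat) : Int) := by
        unfold PySem.Int.floordiv
        rw [Int.fdiv_eq_ediv, if_pos (Or.inl (by norm_num))]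
        omega
      rw [has666Loop, Nat.digits_def' (by omega : 1 < 10) hm]
      have hpos : (0 : Int) < (m : Int) := by exact_mod_cast hm
      rw [dif_pos hpos, hmod, hdiv]
      simp only [scan6]
      have hcast : (if 6 == ((m % 10 : Nat) : Int) then (c : Int) + 1 else (0 : Int))
          = (((if m % 10 = 6 then c + 1 else 0 : Nat)) : Int) := by
        by_cases h6 : m % 10 = 6
        · simp [h6]
        · simp [h6]
          omega
      rw [hcast]
      set c'n : Nat := if m % 10 = 6 then c + 1 else 0 with hcn
      have h3b : (3 == ((c'n : Nat) : Int)) = decide (c'n = 3) := by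
        by_cases h3 : c'n = 3
        · simp [h3]
        · have h1 : (3 == ((c'n : Nat) : Int)) = false := by simp; omega
          simp [h1, h3]
      rw [h3b]
      by_cases h3 : c'n = 3
      · simp [h3]
      · simp only [h3, decide_false, Bool.false_eq_true, if_false]
        exact ih (m / 10) (Nat.div_lt_self hm (by omega)) c'n
    · have hz : m = 0 := by omega
      subst hz
      rw [has666Loop, dif_neg (by omega)]
      simp [scan6]

-- a non-6 head cannot take part in a [6,6,6] occurrence
theorem infix_666_cons {d : Nat} {ds : List Nat} (hd : d ≠ 6) :
    [6, 6, 6] <:+: d :: ds ↔ [6, 6, 6] <:+: ds := by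
  rw [List.infix_cons_iff]
  constructor
  · rintro (⟨t, ht⟩ | h)
    · simp at ht; omega
    · exact h
  · exact Or.inr

theorem infix_666_six_cons {d : Nat} {ds : List Nat} (hd : d ≠ 6) :
    [6, 6, 6] <:+: 6 :: d :: ds ↔ [6, 6, 6] <:+: ds := by
  rw [List.infix_cons_iff]
  constructor
  · rintro (⟨t, ht⟩ | h)
    · simp at ht; omega
    · exact (infix_666_cons hd).mp h
  · intro h; exact Or.inr ((infix_666_cons hd).mpr h)

theorem infix_666_six_six_cons {d : Nat} {ds : List Nat} (hd : d ≠ 6) :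
    [6, 6, 6] <:+: 6 :: 6 :: d :: ds ↔ [6, 6, 6] <:+: ds := by
  rw [List.infix_cons_iff]
  constructor
  · rintro (⟨t, ht⟩ | h)
    · simp at ht; omega
    · exact (infix_666_six_cons hd).mp h
  · intro h; exact Or.inr ((infix_666_six_cons hd).mpr h)

theorem scan6_iff_infix : ∀ (ds : List Nat) (c : Nat), c ≤ 2 →
    (scan6 ds c = true ↔ [6, 6, 6] <:+: (List.replicate c 6 ++ ds)) := by
  intro ds
  induction ds with
  | nil =>
    intro c hc
    simp only [scan6]
    constructor
    · intro h; cases h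
    · intro h
      have := h.length_le
      simp at this; omega
  | cons d ds ih =>
    intro c hc
    by_cases h6 : d = 6
    · subst h6
      have hassoc : List.replicate c 6 ++ 6 :: ds = List.replicate (c + 1) 6 ++ ds := by
        rw [List.replicate_succ']; simp
      by_cases h3 : c + 1 = 3
      · have hc2 : c = 2 := by omega
        subst hc2
        rw [show scan6 (6 :: ds) 2 = true from by simp [scan6]]
        constructor
        · intro _
          exact ⟨[], ds, by simp [List.replicate]⟩
        · intro _; rfl
      · rw [show scan6 (6 :: ds) c = scan6 ds (c + 1) from by simp [scan6, h3]]
        rw [ih (c + 1) (by omega), hassoc]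
    · rw [show scan6 (d :: ds) c = scan6 ds 0 from by simp [scan6, h6]]
      rw [ih 0 (by omega)]
      simp only [List.replicate_zero, List.nil_append]
      interval_cases c
      · simp only [List.replicate_zero, List.nil_append]
        exact (infix_666_cons h6).symm
      · simp only [List.replicate]
        exact (infix_666_six_cons h6).symm
      · simp only [List.replicate]
        exact (infix_666_six_six_cons h6).symm

theorem digitChar_eq_six {d : Nat} (hd : d < 10) :
    Nat.digitChar d = '6' ↔ d = 6 := by
  interval_cases d <;> simp [Nat.digitChar]

theorem digits_infix_iff_chars : ∀ (ds : List Nat), (∀ d ∈ ds, d < 10) →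
    ([6, 6, 6] <:+: ds ↔ ['6', '6', '6'] <:+: ds.map Nat.digitChar) := by
  intro ds
  induction ds with
  | nil => intro _; simp
  | cons d ds ih =>
    intro hlt
    have hd : d < 10 := hlt d (by simp)
    have hds : ∀ x ∈ ds, x < 10 := fun x hx => hlt x (by simp [hx])
    rw [List.map_cons]
    constructor
    · intro h
      rcases List.infix_cons_iff.mp h with hpre | hinf
      · obtain ⟨t, ht⟩ := hpre
        apply List.infix_cons_iff.mpr; left
        exact ⟨t.map Nat.digitChar,
          by simpa [Nat.digitChar] using congrArg (List.map Nat.digitChar) ht⟩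
      · exact List.infix_cons_iff.mpr (Or.inr ((ih hds).mp hinf))
    · intro h
      rcases List.infix_cons_iff.mp h with hpre | hinf
      · obtain ⟨t, ht⟩ := hpre
        simp only [List.cons_append, List.nil_append, List.cons.injEq] at ht
        obtain ⟨h1, hrest⟩ := ht
        obtain ⟨e1, es1, he1, hc1, hm1⟩ := List.map_eq_cons_iff.mp hrest.symm
        obtain ⟨e2, es2, he2, hc2, hm2⟩ := List.map_eq_cons_iff.mp hm1
        have hd6 : d = 6 := (digitChar_eq_six hd).mp h1.symm
        have he16 : e1 = 6 := by
          have : e1 < 10 := hds e1 (by simp [he1])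
          exact (digitChar_eq_six this).mp hc1
        have he26 : e2 = 6 := by
          have : e2 < 10 := hds e2 (by simp [he1, he2])
          exact (digitChar_eq_six this).mp hc2
        exact ⟨[], es2, by simp [hd6, he1, he2, he16, he26]⟩
      · exact List.infix_cons_iff.mpr (Or.inr ((ih hds).mpr hinf))

theorem infix_rev_666 (L : List Char) :
    ['6', '6', '6'] <:+: L.reverse ↔ ['6', '6', '6'] <:+: L := by
  constructor
  · intro h
    have := List.reverse_infix.mpr h
    simpa using this
  · intro h
    have := List.reverse_infix.mpr h
    simpa using this

theorem toDigitsCore_eq : ∀ (f n : Nat) (l : List Char), 0 < n → n < f →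
    Nat.toDigitsCore 10 f n l = ((Nat.digits 10 n).map Nat.digitChar).reverse ++ l := by
  intro f
  induction f with
  | zero => intro n l hn hf; omega
  | succ f ih =>
    intro n l hn hf
    rw [Nat.toDigitsCore]
    rw [Nat.digits_def' (by omega : 1 < 10) hn]
    by_cases h0 : n / 10 = 0
    · have hnil : Nat.digits 10 (n / 10) = [] := by rw [h0]; simp
      rw [if_pos h0, hnil]
      simp
    · have hlt : n / 10 < f := by
        have := Nat.div_lt_self hn (by omega : 1 < 10)
        omega
      rw [if_neg h0, ih (n / 10) _ (by omega) hlt]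
      simp

theorem toChars_pos {n : Int} (hn : 0 < n) :
    PySem.Int.toChars n = ((Nat.digits 10 n.toNat).map Nat.digitChar).reverse := by
  unfold PySem.Int.toChars
  rw [if_neg (by omega)]
  rw [Nat.toDigits, toDigitsCore_eq (n.toNat + 1) n.toNat [] (by omega) (by omega)]
  simp

-- ===== VERDICT (by name: the statement is the Claim_ definition above) =====
theorem has666_spec : Claim_equal_has666 := by
  unfold Claim_equal_has666 Spec_has666
  intro n _
  unfold has666 has666_alt
  by_cases hn : 0 < n
  · rw [decide_eq_true (by omega : n > 0), Bool.true_and]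
    rw [PySem.Str.isIn_eq, PySem.Int.toList_toStr, toChars_pos hn]
    rw [Bool.eq_iff_iff]
    rw [show n = ((n.toNat : Nat) : Int) from by omega,
      show ((0 : Int)) = ((0 : Nat) : Int) from rfl, has666Loop_eq_scan6]
    rw [scan6_iff_infix _ 0 (by omega)]
    rw [PySem.Chars.isIn_iff_infix]
    rw [show ("666" : String).toList = ['6', '6', '6'] from by decide]
    simp only [Int.toNat_natCast, List.replicate_zero, List.nil_append]
    rw [infix_rev_666]
    exact digits_infix_iff_chars _ (fun d hd => Nat.digits_lt_base (by omega) hd)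
  · rw [has666Loop, dif_neg hn, decide_eq_false (by omega : ¬ n > 0), Bool.false_and]
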